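-- pv_equiv track=rewrite | github.com/LibrechtKuijvenhoven/LedLightApp | rpi/settings.py | colours
-- ===== SOURCE A (Python) =====
-- def colours (x, n, on, off):
--     """
--     Checks wich leds chould be on and which should be off
--
--     @param x - current position of outer scope loop : int
--     @param n - total leds on ledstrip : int
--     @param on - color when led must be on : int[]
--     @param off - color when led must be off : int[]
--
--     @return list of colors in order : [int[]]
--     """
--     result = []
--     for i in range(0,n):
--         if i == x or i == x + 1 or i == x - 1:
--             result.append(on)
--         else:
--             result.append(off)
--     return result
-- ===== SOURCE B (Python) =====
-- def colours(x, n, on, off):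
--     lo = min(max(x - 1, 0), n)
--     hi = min(max(x + 2, 0), n)
--     return [off] * lo + [on] * (hi - lo) + [off] * (n - hi)
-- ===== Notes on version B (the rewrite author's own statement) =====
-- stated objective: alternative
-- what changed: B computes the lit interval [x-1,x+1] clamped to [0,n) in closed form and returns the concatenation of three replicated segments off/on/off, with no per-index loop or test at all.
import Mathlib
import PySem

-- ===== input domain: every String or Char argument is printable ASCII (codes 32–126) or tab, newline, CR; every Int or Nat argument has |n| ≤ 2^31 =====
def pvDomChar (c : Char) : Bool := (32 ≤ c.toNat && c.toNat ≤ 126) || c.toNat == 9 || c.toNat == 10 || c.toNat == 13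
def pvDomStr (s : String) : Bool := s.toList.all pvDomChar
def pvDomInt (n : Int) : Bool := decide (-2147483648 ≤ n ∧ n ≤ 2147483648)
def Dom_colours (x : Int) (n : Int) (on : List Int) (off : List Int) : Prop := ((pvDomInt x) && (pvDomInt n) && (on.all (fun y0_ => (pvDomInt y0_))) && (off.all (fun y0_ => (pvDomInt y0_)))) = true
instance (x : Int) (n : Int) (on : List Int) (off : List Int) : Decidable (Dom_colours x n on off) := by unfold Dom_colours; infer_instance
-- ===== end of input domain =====

-- B replaces A's per-index loop by closed-form arithmetic: it clamps the lit
-- interval [x-1,x+1] to [0,n) and concatenates three replicated segments off/on/off (alternative).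

-- ===== PORT A =====
def colours (x : Int) (n : Int) (on : List Int) (off : List Int) : List (List Int) :=
  (PySem.List.pyRange 0 n 1).foldl
    (fun result i => result ++ [if i = x ∨ i = x + 1 ∨ i = x - 1 then on else off]) []

-- ===== PORT B =====
def colours_alt (x : Int) (n : Int) (on : List Int) (off : List Int) : List (List Int) :=
  let lo := min (max (x - 1) 0) n
  let hi := min (max (x + 2) 0) n
  List.replicate lo.toNat off ++ List.replicate (hi - lo).toNat on ++ List.replicate (n - hi).toNat off

-- ===== PRECONDITION & SPEC =====
def Spec_colours (x : Int) (n : Int) (on : List Int) (off : List Int) (out : List (List Int)) : Prop := out = colours_alt x n on off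
instance (x : Int) (n : Int) (on : List Int) (off : List Int) (out : List (List Int)) : Decidable (Spec_colours x n on off out) := by unfold Spec_colours; infer_instance

-- ===== CLAIM (what is proved, stated in full; the proofs are below) =====
def Claim_equal_colours : Prop := ∀ (x : Int) (n : Int) (on : List Int) (off : List Int), Dom_colours x n on off → Spec_colours x n on off (colours x n on off)

-- ===== LEMMAS AND PROOFS =====

theorem colours_eq_map (x n : Int) (on off : List Int) :
    colours x n on off =
      (PySem.List.pyRange 0 n 1).map
        (fun i => if i = x ∨ i = x + 1 ∨ i = x - 1 then on else off) := by
  unfold colours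
  rw [PySem.List.foldl_append_singleton_eq_map]
  simp

theorem colours_alt_length (x n : Int) (on off : List Int) :
    (colours_alt x n on off).length = n.toNat := by
  unfold colours_alt
  simp only [List.length_append, List.length_replicate]
  omega

theorem colours_alt_getElem (x n : Int) (on off : List Int) (k : Nat)
    (hk : k < (colours_alt x n on off).length) :
    (colours_alt x n on off)[k] =
      if (k : Int) = x ∨ (k : Int) = x + 1 ∨ (k : Int) = x - 1 then on else off := by
  have hkn : k < n.toNat := by rw [colours_alt_length] at hk; exact hk
  unfold colours_alt
  simp only [List.getElem_append, List.length_append, List.length_replicate, List.getElem_replicate]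
  split_ifs <;> (try rfl) <;> (exfalso; omega)

-- ===== VERDICT (by name: the statement is the Claim_ definition above) =====
theorem colours_spec : Claim_equal_colours := by
  intro x n on off _
  unfold Spec_colours
  rw [colours_eq_map]
  apply List.ext_getElem
  · simp [colours_alt_length, PySem.List.length_pyRange_one]
  · intro k h1 h2
    rw [colours_alt_getElem]
    simp only [List.getElem_map, PySem.List.getElem_pyRange_one, zero_add]
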